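-- pv_equiv track=rewrite | github.com/PlaviAjvar/Logic-Minimization | logic_optimization.py | parse_cnf
-- ===== SOURCE A (Python) =====
-- def parse_dnf(dnf_str):
--     # we first strip all whitespace
--     dnf_str = "".join(dnf_str.split())
--     conj_list = dnf_str.split('v')  # splits expression by disjunction
--     conj_num = len(conj_list)
--
--     dnf = [[] for i in range(conj_num)]
--     for conj_idx in range(conj_num):
--         conj_len = len(conj_list[conj_idx])
--         for i in range(conj_len):
--             if conj_list[conj_idx][i].isalnum():
--                 # pass the ascii value of the character into the dnf list
--                 # if the argument is negated, pass it's negative ascii value into the dnf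
--                 if i < conj_len-1 and conj_list[conj_idx][i+1] == "'":
--                     dnf[conj_idx].append(-ord(conj_list[conj_idx][i]))
--                 else:
--                     dnf[conj_idx].append(ord(conj_list[conj_idx][i]))
--
--     return dnf
--
-- def parse_cnf(cnf_str):
--     # tests if there is a conjuction between the 2 characters
--     def is_lim(left, right):
--         left_lim = False
--         right_lim = False
--         # it should be a right parentheses or a variable
--         if left != "(" and left != "v" and left != " ":
--             left_lim = True
--         if right != ")" and right != "v" and right != "'" and right != " ":
--             right_lim = True
--         return (left_lim and right_lim)
--
--     # we will turn the problem into equivalent dnf and call parse_dnf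
--     # remove all "v"
--     cnf_str = cnf_str.replace("v", " ")
--     # for all delimitters ")(", "AB", "A(" or ")A" add "v" in the middle
--     new_cnf = ""
--     for i in range(len(cnf_str)):
--         if i > 0 and is_lim(cnf_str[i-1], cnf_str[i]):  # two delimitters next to eachother
--             new_cnf += "v"
--         new_cnf += cnf_str[i]
--     cnf_str = new_cnf
--
--     # remove all parentheses
--     cnf_str = cnf_str.replace("(", "")
--     cnf_str = cnf_str.replace(")", "")
--     # remove all whitespace
--     cnf_str = cnf_str.replace(" ", "")
--
--     return parse_dnf(cnf_str)
-- ===== SOURCE B (Python) =====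
-- def parse_cnf(cnf_str):
--     # tests if there is a conjunction between the 2 characters (same boundary rule as the original)
--     def is_lim(left, right):
--         return (left != "(" and left != "v" and left != " ") and \
--                (right != ")" and right != "v" and right != "'" and right != " ")
--
--     # single pass: build the clause lists directly, no intermediate strings
--     result = [[]]
--     pending = False  # last kept char of the current clause was alphanumeric
--     prev = None
--     for c in cnf_str:
--         if c == 'v':
--             c = ' '
--         if prev is not None and is_lim(prev, c):
--             result.append([])
--             pending = False
--         prev = c
--         if c == '(' or c == ')' or c.isspace():
--             continue
--         if c.isalnum():
--             result[-1].append(ord(c))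
--             pending = True
--         else:
--             if c == "'" and pending:
--                 result[-1][-1] = -result[-1][-1]
--             pending = False
--     return result
-- ===== Notes on version B (the rewrite author's own statement) =====
-- stated objective: faster
-- what changed: B replaces A's rebuild-a-string pipeline (replace 'v', insert 'v' at clause boundaries, strip parens/whitespace, re-split and re-scan via parse_dnf) with a single left-to-right pass that emits the nested clause lists directly, handling negation by patching the last literal when the apostrophe arrives instead of looking ahead in a rebuilt string.
import Mathlib
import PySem

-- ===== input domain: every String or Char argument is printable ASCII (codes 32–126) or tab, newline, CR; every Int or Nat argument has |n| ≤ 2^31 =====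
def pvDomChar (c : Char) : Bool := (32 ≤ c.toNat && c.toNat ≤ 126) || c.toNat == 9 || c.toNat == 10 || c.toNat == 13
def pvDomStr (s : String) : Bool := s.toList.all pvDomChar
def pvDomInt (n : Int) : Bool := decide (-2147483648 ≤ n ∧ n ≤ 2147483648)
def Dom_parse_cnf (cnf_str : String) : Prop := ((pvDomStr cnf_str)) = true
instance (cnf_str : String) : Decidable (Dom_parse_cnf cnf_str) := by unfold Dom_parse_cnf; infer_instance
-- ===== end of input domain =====

-- B replaces A's rebuild-a-string pipeline by a single pass that emits the clause lists
-- directly (negation patches the last literal when the apostrophe arrives); measurably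
-- faster by a constant factor.

-- ===== PORT A =====
-- is_lim, the inner helper of A's parse_cnf
def pvIsLimA (left right : Char) : Bool :=
  (left != '(' && left != 'v' && left != ' ') &&
  (right != ')' && right != 'v' && right != '\'' && right != ' ')

-- parse_dnf, transliterated (loops become folds over pyRange with the same mutated state;
-- conj_idx.toNat is exact: conj_idx ranges over 0..conj_num-1, never negative)
def pvParseDnf (dnf_str : List Char) : List (List Int) :=
  let dnf_str := PySem.Chars.join [] (PySem.Chars.split₀ dnf_str)   -- "".join(dnf_str.split())
  let conj_list := PySem.Chars.splitOn dnf_str ['v']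
  let conj_num : Int := (conj_list.length : Int)
  let dnf : List (List Int) := (PySem.List.pyRange 0 conj_num 1).map (fun _ => [])
  (PySem.List.pyRange 0 conj_num 1).foldl (fun dnf conj_idx =>
    let conj_len : Int := ((PySem.List.pyGetD conj_list conj_idx []).length : Int)
    (PySem.List.pyRange 0 conj_len 1).foldl (fun dnf i =>
      if PySem.Chars.isalnum (PySem.List.pyGetD (PySem.List.pyGetD conj_list conj_idx []) i ' ') then
        if decide (i < conj_len - 1) &&
            (PySem.List.pyGetD (PySem.List.pyGetD conj_list conj_idx []) (i+1) ' ' == '\'') then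
          dnf.modify conj_idx.toNat
            (fun x => x ++ [-(((PySem.List.pyGetD (PySem.List.pyGetD conj_list conj_idx []) i ' ').toNat : Int))])
        else
          dnf.modify conj_idx.toNat
            (fun x => x ++ [(((PySem.List.pyGetD (PySem.List.pyGetD conj_list conj_idx []) i ' ').toNat : Int))])
      else dnf) dnf) dnf

def parse_cnf (cnf_str : String) : List (List Int) :=
  let cnf_str := cnf_str.toList
  let cnf_str := PySem.Chars.replace cnf_str ['v'] [' ']            -- cnf_str.replace("v", " ")
  let new_cnf : List Char :=                                        -- the insertion loop
    (PySem.List.pyRange 0 (PySem.Chars.len cnf_str) 1).foldl (fun new_cnf i =>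
      (if decide (0 < i) &&
          pvIsLimA (PySem.List.pyGetD cnf_str (i-1) ' ') (PySem.List.pyGetD cnf_str i ' ')
       then new_cnf ++ ['v'] else new_cnf) ++ [PySem.List.pyGetD cnf_str i ' ']) []
  let cnf_str := new_cnf
  let cnf_str := PySem.Chars.replace cnf_str ['('] []
  let cnf_str := PySem.Chars.replace cnf_str [')'] []
  let cnf_str := PySem.Chars.replace cnf_str [' '] []
  pvParseDnf cnf_str

-- ===== PORT B =====
-- B's own copy of is_lim
def pvIsLimB (left right : Char) : Bool :=
  (left != '(' && left != 'v' && left != ' ') &&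
  (right != ')' && right != 'v' && right != '\'' && right != ' ')

-- one loop step of B; state = (result-so-far, current clause REVERSED, pending, prev).
-- The current clause is kept reversed so that 'append' is cons and 'patch last literal'
-- is a head rewrite; the final clause is reversed back on output.
def pvStepB (st : List (List Int) × List Int × Bool × Option Char) (c0 : Char) :
    List (List Int) × List Int × Bool × Option Char :=
  let c := if c0 == 'v' then ' ' else c0
  let t : List (List Int) × List Int × Bool :=
    match st.2.2.2 with
    | some p => if pvIsLimB p c then (st.1 ++ [st.2.1.reverse], [], false)
                else (st.1, st.2.1, st.2.2.1)
    | none => (st.1, st.2.1, st.2.2.1)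
  if c == '(' || c == ')' || PySem.Chars.isspace c then
    (t.1, t.2.1, t.2.2, some c)
  else if PySem.Chars.isalnum c then
    (t.1, (c.toNat : Int) :: t.2.1, true, some c)
  else if c == '\'' && t.2.2 then
    (t.1, (match t.2.1 with | x :: r => -x :: r | [] => []), false, some c)
  else
    (t.1, t.2.1, false, some c)

def parse_cnf_alt (cnf_str : String) : List (List Int) :=
  let st := cnf_str.toList.foldl pvStepB ([], [], false, none)
  st.1 ++ [st.2.1.reverse]

-- ===== PRECONDITION & SPEC =====
def Spec_parse_cnf (cnf_str : String) (out : List (List Int)) : Prop := out = parse_cnf_alt cnf_str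
instance (cnf_str : String) (out : List (List Int)) : Decidable (Spec_parse_cnf cnf_str out) := by unfold Spec_parse_cnf; infer_instance

-- ===== CLAIM (what is proved, stated in full; the proofs are below) =====
def Claim_equal_parse_cnf : Prop := ∀ (cnf_str : String), Dom_parse_cnf cnf_str → Spec_parse_cnf cnf_str (parse_cnf cnf_str)

-- ===== LEMMAS AND PROOFS =====

-- ---------- proof-side specification functions ----------

def pvVmap (c : Char) : Char := if c == 'v' then ' ' else c

def pvRem (c : Char) : Bool := c == '(' || c == ')' || PySem.Chars.isspace c

def pvKa (c : Char) : Bool := !(pvRem c)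

def pvHcons (c : Char) : List (List Char) → List (List Char)
  | [] => [[c]]
  | h :: t => (c :: h) :: t

def pvChks (p : Char) : List Char → List (List Char)
  | [] => [[]]
  | c :: cs => if pvIsLimA p c then [] :: pvHcons c (pvChks c cs) else pvHcons c (pvChks c cs)

def pvChA : List Char → List (List Char)
  | [] => [[]]
  | c :: cs => pvHcons c (pvChks c cs)

def pvInsV (p : Char) : List Char → List Char
  | [] => []
  | c :: cs => (if pvIsLimA p c then ['v', c] else [c]) ++ pvInsV c cs

def pvInsA : List Char → List Char
  | [] => []
  | c :: cs => c :: pvInsV c cs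

def pvSplitV : List Char → List (List Char)
  | [] => [[]]
  | c :: cs => if c == 'v' then [] :: pvSplitV cs else pvHcons c (pvSplitV cs)

def pvPhead (x : List Char) : List (List Char) → List (List Char)
  | [] => [x]
  | h :: t => (x ++ h) :: t

def pvSegLits : List Char → List Int
  | [] => []
  | c :: t => if PySem.Chars.isalnum c then
      (match t with
       | d :: _ => if d == '\'' then -((c.toNat : Int)) else ((c.toNat : Int))
       | [] => ((c.toNat : Int))) :: pvSegLits t
    else pvSegLits t

def pvKstep (cur : List Int) (pending : Bool) (c : Char) : List Int × Bool :=
  if c == '(' || c == ')' || PySem.Chars.isspace c then (cur, pending)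
  else if PySem.Chars.isalnum c then (((c.toNat : Int)) :: cur, true)
  else if c == '\'' && pending then ((match cur with | x :: r => -x :: r | [] => []), false)
  else (cur, false)

def pvScan (cur : List Int) (pending : Bool) : List Char → List Int
  | [] => cur.reverse
  | c :: t => pvScan (pvKstep cur pending c).1 (pvKstep cur pending c).2 t

def pvMapCh (cur : List Int) (pending : Bool) : List (List Char) → List (List Int)
  | [] => []
  | h :: t => pvScan cur pending h :: t.map (fun ch => pvScan [] false ch)

-- ---------- string-primitive characterizations (A side) ----------

theorem pvReplaceGo_single (a b : Char) :
    ∀ (l : List Char) (fuel : ℕ) (acc : List Char), l.length ≤ fuel →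
      PySem.Chars.replace.go [a] [b] fuel l acc
        = acc.reverse ++ l.map (fun c => if c == a then b else c) := by
  intro l
  induction l with
  | nil =>
    intro fuel acc _
    cases fuel <;> simp [PySem.Chars.replace.go]
  | cons c t ih =>
    intro fuel acc h
    cases fuel with
    | zero => simp at h
    | succ f =>
      rw [PySem.Chars.replace.go]
      by_cases hca : c = a
      · subst hca
        simp only [List.isPrefixOf, BEq.rfl, Bool.and_true, if_true]
        simp only [List.length_cons, List.length_nil, List.drop_succ_cons, List.drop_zero]
        rw [ih f _ (by simpa using h)]
        simp
      · have : ([a].isPrefixOf (c :: t)) = false := by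
          simp [List.isPrefixOf]
          exact fun hh => absurd hh.symm hca
        rw [this]
        simp only [Bool.false_eq_true, if_false]
        rw [ih f _ (by simpa using h)]
        simp [hca]

theorem pvReplace_single (a b : Char) (l : List Char) :
    PySem.Chars.replace l [a] [b] = l.map (fun c => if c == a then b else c) := by
  rw [PySem.Chars.replace]
  simp only [List.isEmpty_cons, if_false, Bool.false_eq_true]
  rw [pvReplaceGo_single a b l l.length [] le_rfl]
  simp

theorem pvReplaceGo_del (a : Char) :
    ∀ (l : List Char) (fuel : ℕ) (acc : List Char), l.length ≤ fuel →
      PySem.Chars.replace.go [a] [] fuel l acc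
        = acc.reverse ++ l.filter (fun c => !(c == a)) := by
  intro l
  induction l with
  | nil =>
    intro fuel acc _
    cases fuel <;> simp [PySem.Chars.replace.go]
  | cons c t ih =>
    intro fuel acc h
    cases fuel with
    | zero => simp at h
    | succ f =>
      rw [PySem.Chars.replace.go]
      by_cases hca : c = a
      · subst hca
        simp only [List.isPrefixOf, BEq.rfl, Bool.and_true, if_true]
        simp only [List.length_cons, List.length_nil, List.drop_succ_cons, List.drop_zero]
        rw [ih f _ (by simpa using h)]
        simp
      · have : ([a].isPrefixOf (c :: t)) = false := by
          simp [List.isPrefixOf]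
          exact fun hh => absurd hh.symm hca
        rw [this]
        simp only [Bool.false_eq_true, if_false]
        rw [ih f _ (by simpa using h)]
        simp [hca]

theorem pvReplace_del (a : Char) (l : List Char) :
    PySem.Chars.replace l [a] [] = l.filter (fun c => !(c == a)) := by
  rw [PySem.Chars.replace]
  simp only [List.isEmpty_cons, if_false, Bool.false_eq_true]
  rw [pvReplaceGo_del a l l.length [] le_rfl]
  simp

theorem pvIntercalateNil (xs : List (List Char)) : List.intercalate [] xs = xs.flatten := by
  induction xs with
  | nil => simp [List.intercalate]
  | cons a t ih =>
    cases t with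
    | nil => simp [List.intercalate]
    | cons b u =>
      simp only [List.intercalate, List.intersperse] at *
      simp_all

theorem pvSplit0Go_flatten :
    ∀ (l cur : List Char) (acc : List (List Char)),
      (PySem.Chars.split₀.go l cur acc).flatten
        = acc.reverse.flatten ++ cur.reverse ++ l.filter (fun c => !PySem.Chars.isspace c) := by
  intro l
  induction l with
  | nil =>
    intro cur acc
    rw [PySem.Chars.split₀.go]
    by_cases hc : cur = []
    · subst hc; simp
    · simp [List.isEmpty_iff, hc]
  | cons c t ih =>
    intro cur acc
    rw [PySem.Chars.split₀.go]
    by_cases hs : PySem.Chars.isspace c = true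
    · simp only [hs, if_true]
      by_cases hc : cur = []
      · subst hc; simp [ih, hs]
      · simp [List.isEmpty_iff, hc, ih, hs]
    · simp [hs, ih]

theorem pvJoinSplit0 (l : List Char) :
    PySem.Chars.join [] (PySem.Chars.split₀ l) = l.filter (fun c => !PySem.Chars.isspace c) := by
  rw [PySem.Chars.join, PySem.Chars.split₀, pvIntercalateNil, pvSplit0Go_flatten]
  simp

theorem pvSplitV_ne_nil (l : List Char) : pvSplitV l ≠ [] := by
  cases l with
  | nil => simp [pvSplitV]
  | cons c cs =>
    rw [pvSplitV]
    split
    · simp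
    · cases h : pvSplitV cs <;> simp [pvHcons]

theorem pvSplitOnGo_v :
    ∀ (l : List Char) (fuel : ℕ) (cur : List Char) (acc : List (List Char)), l.length < fuel →
      PySem.Chars.splitOn.go ['v'] fuel l cur acc
        = acc.reverse ++ pvPhead cur.reverse (pvSplitV l) := by
  intro l
  induction l with
  | nil =>
    intro fuel cur acc h
    cases fuel with
    | zero => omega
    | succ f => rw [PySem.Chars.splitOn.go]; simp [pvSplitV, pvPhead]; omega
  | cons c t ih =>
    intro fuel cur acc h
    cases fuel with
    | zero => omega
    | succ f =>
      rw [PySem.Chars.splitOn.go]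
      by_cases hcv : c = 'v'
      · subst hcv
        simp only [List.isPrefixOf, BEq.rfl, Bool.and_true, if_true]
        simp only [List.length_cons, List.length_nil, List.drop_succ_cons, List.drop_zero]
        rw [ih f _ _ (by simp at h ⊢; omega)]
        rcases hsp : pvSplitV t with _ | ⟨h1, t1⟩
        · exact absurd hsp (pvSplitV_ne_nil t)
        · simp [pvSplitV, pvPhead, hsp]
      · have : (['v'].isPrefixOf (c :: t)) = false := by
          simp [List.isPrefixOf]
          exact fun hh => absurd hh.symm hcv
        rw [this]
        simp only [Bool.false_eq_true, if_false]
        rw [ih f _ _ (by simp at h ⊢; omega)]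
        rcases hsp : pvSplitV t with _ | ⟨h1, t1⟩
        · exact absurd hsp (pvSplitV_ne_nil t)
        · simp [pvSplitV, pvPhead, hsp, hcv, pvHcons]

theorem pvSplitOn_v (l : List Char) : PySem.Chars.splitOn l ['v'] = pvSplitV l := by
  rw [PySem.Chars.splitOn, pvSplitOnGo_v l (l.length + 1) [] [] (by omega)]
  rcases hsp : pvSplitV l with _ | ⟨h1, t1⟩
  · exact absurd hsp (pvSplitV_ne_nil l)
  · simp [pvPhead]

-- ---------- the insertion loop (A side) ----------

theorem pvInsR (cs : List Char) : ∀ (p : Char),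
    (List.range cs.length).flatMap
      (fun k => (if pvIsLimA ((p :: cs).getD k ' ') (cs.getD k ' ') then ['v'] else [])
                ++ [cs.getD k ' ']) = pvInsV p cs := by
  induction cs with
  | nil => intro p; simp [pvInsV]
  | cons c t ih =>
    intro p
    rw [List.length_cons, List.range_succ_eq_map, List.flatMap_cons, List.flatMap_map]
    have h0 : ((if pvIsLimA ((p :: c :: t).getD 0 ' ') ((c :: t).getD 0 ' ') then ['v'] else [])
        ++ [(c :: t).getD 0 ' ']) = (if pvIsLimA p c then ['v', c] else [c]) := by
      by_cases h : pvIsLimA p c <;> simp [h]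
    rw [h0]
    simp only [Nat.succ_eq_add_one, List.getD_cons_succ]
    rw [ih c]
    simp [pvInsV]

theorem pvInsLoop (l0 : List Char) :
    (PySem.List.pyRange 0 (PySem.Chars.len l0) 1).foldl (fun new_cnf i =>
      (if decide (0 < i) &&
          pvIsLimA (PySem.List.pyGetD l0 (i-1) ' ') (PySem.List.pyGetD l0 i ' ')
       then new_cnf ++ ['v'] else new_cnf) ++ [PySem.List.pyGetD l0 i ' ']) []
    = pvInsA l0 := by
  have hlen : PySem.Chars.len l0 = ((l0.length : ℕ) : Int) := by
    simp [PySem.Chars.len]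
  rw [hlen, PySem.List.pyRange_zero_natCast, List.foldl_map]
  have hbody : ∀ (acc : List Char), ∀ k ∈ List.range l0.length,
      (fun (new_cnf : List Char) (k : ℕ) =>
        (if decide (0 < ((k:ℕ):Int)) &&
            pvIsLimA (PySem.List.pyGetD l0 (((k:ℕ):Int)-1) ' ') (PySem.List.pyGetD l0 ((k:ℕ):Int) ' ')
         then new_cnf ++ ['v'] else new_cnf) ++ [PySem.List.pyGetD l0 ((k:ℕ):Int) ' ']) acc k
      = (fun (new_cnf : List Char) (k : ℕ) => new_cnf ++
          ((if decide (0 < ((k:ℕ):Int)) &&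
              pvIsLimA (PySem.List.pyGetD l0 (((k:ℕ):Int)-1) ' ') (PySem.List.pyGetD l0 ((k:ℕ):Int) ' ')
            then ['v'] else []) ++ [PySem.List.pyGetD l0 ((k:ℕ):Int) ' '])) acc k := by
    intro acc k _
    dsimp only
    split <;> simp
  rw [PySem.List.foldl_congr_mem _ _ _ _ hbody, PySem.List.foldl_append_eq_flatMap]
  cases l0 with
  | nil => simp [pvInsA]
  | cons c t =>
    rw [List.length_cons, List.range_succ_eq_map, List.flatMap_cons, List.flatMap_map]
    have h0 : ((if decide (0 < ((0:ℕ):Int)) &&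
          pvIsLimA (PySem.List.pyGetD (c::t) (((0:ℕ):Int)-1) ' ') (PySem.List.pyGetD (c::t) ((0:ℕ):Int) ' ')
        then ['v'] else []) ++ [PySem.List.pyGetD (c::t) ((0:ℕ):Int) ' ']) = [c] := by
      simp [PySem.List.pyGetD]
    have hsh : (fun (k:ℕ) =>
        (if decide (0 < ((k.succ:ℕ):Int)) &&
            pvIsLimA (PySem.List.pyGetD (c::t) (((k.succ:ℕ):Int)-1) ' ') (PySem.List.pyGetD (c::t) ((k.succ:ℕ):Int) ' ')
          then ['v'] else []) ++ [PySem.List.pyGetD (c::t) ((k.succ:ℕ):Int) ' '])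
        = (fun (k:ℕ) => (if pvIsLimA ((c::t).getD k ' ') (t.getD k ' ') then ['v'] else [])
            ++ [t.getD k ' ']) := by
      funext k
      have e1 : ((k.succ:ℕ):Int) - 1 = ((k:ℕ):Int) := by push_cast; ring
      have e2 : ((k.succ:ℕ):Int) = (((k+1:ℕ)):Int) := by push_cast; ring
      have e3 : decide (0 < ((k.succ:ℕ):Int)) = true := by simp
      rw [e3, e1, e2, PySem.List.pyGetD_natCast, PySem.List.pyGetD_natCast]
      simp
    simp only [h0]
    have hfm := congrArg (fun F => List.flatMap F (List.range t.length)) hsh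
    simp only at hfm
    rw [hfm, pvInsR t c]
    simp [pvInsA]

-- ---------- filters combine ----------

theorem pvKa_pointwise (c : Char) :
    (!PySem.Chars.isspace c && !(c == ' ') && !(c == ')') && !(c == '(')) = pvKa c := by
  unfold pvKa pvRem
  by_cases h1 : c = '('
  · subst h1; decide
  by_cases h2 : c = ')'
  · subst h2; decide
  by_cases h3 : PySem.Chars.isspace c = true
  · simp [h3]
  · have hsp : c ≠ ' ' := by
      intro h; subst h; exact h3 (by decide)
    simp [h1, h2, h3, hsp, Bool.and_comm, Bool.and_left_comm]


-- ---------- parse_dnf double loop = map pvSegLits ----------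

theorem pvModifyId (d : List (List Int)) (k : ℕ) : d.modify k (fun x => x) = d := by
  apply List.ext_getElem?
  intro j
  by_cases h : j = k
  · subst h; simp
  · exact List.getElem?_modify_ne _ _ (Ne.symm h)

theorem pvModifyFold {α : Type} (is : List α) (step : List Int → α → List Int) (k : ℕ) :
    ∀ (d0 : List (List Int)),
      is.foldl (fun d i => d.modify k (fun x => step x i)) d0
        = d0.modify k (fun x => is.foldl step x) := by
  induction is with
  | nil => intro d0; simp only [List.foldl_nil]; exact (pvModifyId d0 k).symm
  | cons i t ih =>
    intro d0
    rw [List.foldl_cons, ih, List.modify_modify_eq]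
    rfl


theorem pvInnerFlat (conj : List Char) :
    (List.range conj.length).flatMap
      (fun k => if PySem.Chars.isalnum (conj.getD k ' ') then
          [(if decide ((k : Int) < (conj.length : Int) - 1) && (conj.getD (k+1) ' ' == '\'')
            then -(((conj.getD k ' ').toNat : Int)) else ((conj.getD k ' ').toNat : Int))]
        else []) = pvSegLits conj := by
  induction conj with
  | nil => simp [pvSegLits]
  | cons c t ih =>
    rw [List.length_cons, List.range_succ_eq_map, List.flatMap_cons, List.flatMap_map]
    have hsh : (fun (k:ℕ) => if PySem.Chars.isalnum ((c::t).getD k.succ ' ') then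
          [(if decide ((k.succ : Int) < ((t.length + 1 : ℕ) : Int) - 1) && ((c::t).getD (k.succ+1) ' ' == '\'')
            then -((((c::t).getD k.succ ' ').toNat : Int)) else (((c::t).getD k.succ ' ').toNat : Int))]
        else [])
        = (fun (k:ℕ) => if PySem.Chars.isalnum (t.getD k ' ') then
          [(if decide ((k : Int) < (t.length : Int) - 1) && (t.getD (k+1) ' ' == '\'')
            then -(((t.getD k ' ').toNat : Int)) else ((t.getD k ' ').toNat : Int))]
        else []) := by
      funext k
      have e1 : (decide ((k.succ : Int) < ((t.length + 1 : ℕ) : Int) - 1))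
          = (decide ((k : Int) < (t.length : Int) - 1)) := by
        congr 1
        apply propext
        push_cast
        omega
      simp only [Nat.succ_eq_add_one, List.getD_cons_succ, e1]
    have hfm := congrArg (fun F => List.flatMap F (List.range t.length)) hsh
    simp only at hfm
    rw [hfm, ih]
    rcases t with _ | ⟨d, u⟩
    · by_cases ha : PySem.Chars.isalnum c = true <;>
        simp [pvSegLits, ha, List.getD]
    · by_cases ha : PySem.Chars.isalnum c = true
      · have hc : decide (((0:ℕ) : Int) < (((c :: d :: u).length : ℕ) : Int) - 1) = true := by
          simp
        by_cases hd : (d == '\'') = true <;>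
          simp [pvSegLits, ha, hd, List.getD]
      · simp [pvSegLits, ha]


theorem pvFoldModify_notmem (is : List ℕ) (g : ℕ → List Int → List Int) :
    ∀ (d0 : List (List Int)) (j : ℕ), j ∉ is →
      (is.foldl (fun d i => d.modify i (g i)) d0)[j]? = d0[j]? := by
  induction is with
  | nil => intro d0 j _; simp
  | cons i t ih =>
    intro d0 j hj
    rw [List.foldl_cons, ih _ j (fun h => hj (List.mem_cons_of_mem _ h))]
    exact List.getElem?_modify_ne _ _ (fun h => hj (h ▸ List.mem_cons_self))


theorem pvFoldModify_mem (is : List ℕ) (g : ℕ → List Int → List Int) :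
    ∀ (d0 : List (List Int)) (j : ℕ), is.Nodup → j ∈ is →
      (is.foldl (fun d i => d.modify i (g i)) d0)[j]? = d0[j]?.map (g j) := by
  induction is with
  | nil => intro d0 j _ h; simp at h
  | cons i t ih =>
    intro d0 j hnd hj
    rw [List.foldl_cons]
    rcases List.mem_cons.mp hj with h | h
    · subst h
      rw [pvFoldModify_notmem t g _ j (List.Nodup.notMem hnd)]
      simp
    · have hne : j ≠ i := by
        intro hh; subst hh; exact (List.Nodup.notMem hnd) h
      rw [ih _ j (List.Nodup.of_cons hnd) h, List.getElem?_modify_ne _ _ (Ne.symm hne)]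


theorem pvOuterMap (xs : List (List Char)) (F : List Char → List Int) :
    (List.range xs.length).foldl
      (fun d k => d.modify k (fun x => x ++ F (xs.getD k [])))
      (xs.map (fun _ => ([] : List Int)))
    = xs.map F := by
  apply List.ext_getElem?
  intro j
  by_cases hj : j < xs.length
  · rw [pvFoldModify_mem (List.range xs.length) (fun k x => x ++ F (xs.getD k []))
        _ j (List.nodup_range) (List.mem_range.mpr hj)]
    rw [List.getElem?_map, List.getElem?_map, List.getElem?_eq_getElem hj]
    simp [List.getD_eq_getElem?_getD, List.getElem?_eq_getElem hj]
  · rw [pvFoldModify_notmem (List.range xs.length) (fun k x => x ++ F (xs.getD k []))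
        _ j (by simpa using hj)]
    rw [List.getElem?_map, List.getElem?_map]
    rw [List.getElem?_eq_none (le_of_not_gt hj)]
    rfl


theorem pvParseDnf_eq (l : List Char) :
    pvParseDnf l = (pvSplitV (l.filter (fun c => !PySem.Chars.isspace c))).map pvSegLits := by
  unfold pvParseDnf
  dsimp only
  rw [pvJoinSplit0, pvSplitOn_v]
  set cl := pvSplitV (l.filter (fun c => !PySem.Chars.isspace c)) with hcl
  rw [PySem.List.pyRange_zero_natCast, List.map_map, List.foldl_map]
  have hinit : (List.range cl.length).map ((fun _ => ([] : List Int)) ∘ (fun (k:ℕ) => (k : Int)))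
      = cl.map (fun _ => ([] : List Int)) := by
    simp [Function.comp_def, List.map_const']
  rw [hinit]
  have houter : ∀ (d : List (List Int)), ∀ k ∈ List.range cl.length,
      (fun (dnf : List (List Int)) (conj_idx : Int) =>
        (PySem.List.pyRange 0 (((PySem.List.pyGetD cl conj_idx []).length : ℕ) : Int) 1).foldl
          (fun dnf i =>
            if PySem.Chars.isalnum (PySem.List.pyGetD (PySem.List.pyGetD cl conj_idx []) i ' ') then
              if decide (i < (((PySem.List.pyGetD cl conj_idx []).length : ℕ) : Int) - 1) &&
                  (PySem.List.pyGetD (PySem.List.pyGetD cl conj_idx []) (i+1) ' ' == '\'') then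
                dnf.modify conj_idx.toNat
                  (fun x => x ++ [-(((PySem.List.pyGetD (PySem.List.pyGetD cl conj_idx []) i ' ').toNat : Int))])
              else
                dnf.modify conj_idx.toNat
                  (fun x => x ++ [(((PySem.List.pyGetD (PySem.List.pyGetD cl conj_idx []) i ' ').toNat : Int))])
            else dnf) dnf) d ((k : ℕ) : Int)
      = d.modify k (fun x => x ++ pvSegLits (cl.getD k [])) := by
    intro d k hk
    dsimp only
    rw [PySem.List.pyGetD_natCast, Int.toNat_natCast, PySem.List.pyRange_zero_natCast,
      List.foldl_map]
    set conj := cl.getD k [] with hconj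
    have hin : ∀ (d' : List (List Int)), ∀ i ∈ List.range conj.length,
        (fun (dnf : List (List Int)) (i : ℕ) =>
          if PySem.Chars.isalnum (PySem.List.pyGetD conj ((i:ℕ):Int) ' ') then
            if decide (((i:ℕ):Int) < ((conj.length : ℕ) : Int) - 1) &&
                (PySem.List.pyGetD conj (((i:ℕ):Int)+1) ' ' == '\'') then
              dnf.modify k (fun x => x ++ [-(((PySem.List.pyGetD conj ((i:ℕ):Int) ' ').toNat : Int))])
            else
              dnf.modify k (fun x => x ++ [(((PySem.List.pyGetD conj ((i:ℕ):Int) ' ').toNat : Int))])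
          else dnf) d' i
        = d'.modify k (fun x =>
            if PySem.Chars.isalnum (conj.getD i ' ') then
              x ++ [(if decide ((i : Int) < (conj.length : Int) - 1) && (conj.getD (i+1) ' ' == '\'')
                then -(((conj.getD i ' ').toNat : Int)) else ((conj.getD i ' ').toNat : Int))]
            else x) := by
      intro d' i hi
      dsimp only
      have e1 : (((i:ℕ):Int)+1) = (((i+1:ℕ)):Int) := by push_cast; ring
      rw [e1, PySem.List.pyGetD_natCast, PySem.List.pyGetD_natCast]
      by_cases ha : PySem.Chars.isalnum (conj.getD i ' ') = true
      · simp only [ha, if_true]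
        by_cases hb : (decide ((i : Int) < (conj.length : Int) - 1) && (conj.getD (i+1) ' ' == '\'')) = true
        · rw [hb]; simp
        · rw [Bool.not_eq_true] at hb; rw [hb]; simp
      · simp only [Bool.not_eq_true] at ha
        simp only [ha, Bool.false_eq_true, if_false]
        exact (pvModifyId d' k).symm
    rw [PySem.List.foldl_congr_mem _ _ _ _ hin, pvModifyFold]
    have hstep : ∀ (x : List Int), ∀ i ∈ List.range conj.length,
        (fun (x : List Int) (i : ℕ) =>
          if PySem.Chars.isalnum (conj.getD i ' ') then
            x ++ [(if decide ((i : Int) < (conj.length : Int) - 1) && (conj.getD (i+1) ' ' == '\'')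
              then -(((conj.getD i ' ').toNat : Int)) else ((conj.getD i ' ').toNat : Int))]
          else x) x i
        = (fun (x : List Int) (i : ℕ) =>
            x ++ (if PySem.Chars.isalnum (conj.getD i ' ') then
              [(if decide ((i : Int) < (conj.length : Int) - 1) && (conj.getD (i+1) ' ' == '\'')
                then -(((conj.getD i ' ').toNat : Int)) else ((conj.getD i ' ').toNat : Int))]
            else [])) x i := by
      intro x i hi
      dsimp only
      split <;> simp
    congr 1
    funext x
    rw [PySem.List.foldl_congr_mem _ _ _ _ hstep, PySem.List.foldl_append_eq_flatMap,
      pvInnerFlat]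
  rw [PySem.List.foldl_congr_mem _ _ _ _ houter, pvOuterMap]


-- ---------- per-chunk scan = segLits of the filtered chunk (B side) ----------

theorem pvScan_filter (ch : List Char) : ∀ (cur : List Int) (pending : Bool),
    pvScan cur pending ch = pvScan cur pending (ch.filter pvKa) := by
  induction ch with
  | nil => intro cur pending; rfl
  | cons c t ih =>
    intro cur pending
    by_cases hr : (c == '(' || c == ')' || PySem.Chars.isspace c) = true
    · have hk : pvKa c = false := by unfold pvKa pvRem; rw [hr]; rfl
      have hs : pvKstep cur pending c = (cur, pending) := by unfold pvKstep; rw [hr]; simp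
      rw [List.filter_cons_of_neg (by simp [hk])]
      show pvScan (pvKstep cur pending c).1 (pvKstep cur pending c).2 t
          = pvScan cur pending (t.filter pvKa)
      rw [hs]
      exact ih cur pending
    · have hk : pvKa c = true := by unfold pvKa pvRem; rw [Bool.not_eq_true] at hr; rw [hr]; rfl
      rw [List.filter_cons_of_pos hk]
      show pvScan (pvKstep cur pending c).1 (pvKstep cur pending c).2 t
          = pvScan (pvKstep cur pending c).1 (pvKstep cur pending c).2 (t.filter pvKa)
      exact ih _ _


theorem pvSegLits_nil : pvSegLits [] = [] := rfl

theorem pvSegLits_cons (c : Char) (t : List Char) :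
    pvSegLits (c :: t)
      = if PySem.Chars.isalnum c then
          (match t with
           | d :: _ => if d == '\'' then -((c.toNat : Int)) else ((c.toNat : Int))
           | [] => ((c.toNat : Int))) :: pvSegLits t
        else pvSegLits t := rfl

theorem pvSegLits_cons_not_alnum (d : Char) (t : List Char)
    (ha : PySem.Chars.isalnum d = false) : pvSegLits (d :: t) = pvSegLits t := by
  rw [pvSegLits_cons, ha]
  simp

theorem pvSegLits_cons_cons_alnum (c d : Char) (t : List Char)
    (hac : PySem.Chars.isalnum c = true) :
    pvSegLits (c :: d :: t)
      = (if d == '\'' then -((c.toNat : Int)) else ((c.toNat : Int))) :: pvSegLits (d :: t) := by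
  rw [pvSegLits_cons, hac]
  simp

theorem pvScanSeg (l : List Char) :
    (∀ c ∈ l, pvRem c = false) →
      (∀ cur, pvScan cur false l = cur.reverse ++ pvSegLits l) ∧
      (∀ (cur : List Int) (c : Char), pvRem c = false → PySem.Chars.isalnum c = true →
        pvScan (((c.toNat : Int)) :: cur) true l = cur.reverse ++ pvSegLits (c :: l)) := by
  induction l with
  | nil =>
    intro _
    refine ⟨fun cur => by simp [pvScan, pvSegLits], fun cur c hrc hac => ?_⟩
    rw [pvSegLits_cons, hac]
    simp [pvScan, pvSegLits_nil]
  | cons d t ih =>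
    intro h
    have hd : pvRem d = false := h d List.mem_cons_self
    have hd' : (d == '(' || d == ')' || PySem.Chars.isspace d) = false := hd
    have ht : ∀ c ∈ t, pvRem c = false := fun c hc => h c (List.mem_cons_of_mem _ hc)
    obtain ⟨ih1, ih2⟩ := ih ht
    constructor
    · intro cur
      by_cases ha : PySem.Chars.isalnum d = true
      · have hstep : pvKstep cur false d = (((d.toNat : Int)) :: cur, true) := by
          unfold pvKstep; rw [hd']; simp [ha]
        show pvScan (pvKstep cur false d).1 (pvKstep cur false d).2 t = _
        rw [hstep]
        exact ih2 cur d hd ha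
      · have ha' : PySem.Chars.isalnum d = false := by simpa using ha
        have hstep : pvKstep cur false d = (cur, false) := by
          unfold pvKstep; rw [hd']; simp [ha']
        show pvScan (pvKstep cur false d).1 (pvKstep cur false d).2 t = _
        rw [hstep, ih1 cur, pvSegLits_cons_not_alnum d t ha']
    · intro cur c hrc hac
      by_cases ha : PySem.Chars.isalnum d = true
      · have hdap : (d == '\'') = false := by
          cases he : (d == '\'') with
          | false => rfl
          | true =>
            have hdv : d = '\'' := beq_iff_eq.mp he
            rw [hdv] at ha
            exact absurd ha (by decide)
        have hstep : pvKstep (((c.toNat : Int)) :: cur) true d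
            = (((d.toNat : Int)) :: ((c.toNat : Int)) :: cur, true) := by
          unfold pvKstep; rw [hd']; simp [ha]
        show pvScan (pvKstep (((c.toNat : Int)) :: cur) true d).1
            (pvKstep (((c.toNat : Int)) :: cur) true d).2 t = _
        rw [hstep, ih2 (((c.toNat : Int)) :: cur) d hd ha,
          pvSegLits_cons_cons_alnum c d t hac, hdap]
        simp
      · have ha' : PySem.Chars.isalnum d = false := by simpa using ha
        by_cases hap : (d == '\'') = true
        · have hstep : pvKstep (((c.toNat : Int)) :: cur) true d
              = ((-((c.toNat : Int))) :: cur, false) := by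
            unfold pvKstep; rw [hd']; simp [ha', hap]
          show pvScan (pvKstep (((c.toNat : Int)) :: cur) true d).1
              (pvKstep (((c.toNat : Int)) :: cur) true d).2 t = _
          rw [hstep, ih1 ((-((c.toNat : Int))) :: cur),
            pvSegLits_cons_cons_alnum c d t hac, hap, pvSegLits_cons_not_alnum d t ha']
          simp
        · have hap' : (d == '\'') = false := by simpa using hap
          have hstep : pvKstep (((c.toNat : Int)) :: cur) true d
              = (((c.toNat : Int)) :: cur, false) := by
            unfold pvKstep; rw [hd']; simp [ha', hap']
          show pvScan (pvKstep (((c.toNat : Int)) :: cur) true d).1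
              (pvKstep (((c.toNat : Int)) :: cur) true d).2 t = _
          rw [hstep, ih1 (((c.toNat : Int)) :: cur),
            pvSegLits_cons_cons_alnum c d t hac, hap', pvSegLits_cons_not_alnum d t ha']
          simp

theorem pvChks_ne_nil (p : Char) (cs : List Char) : pvChks p cs ≠ [] := by
  cases cs with
  | nil => simp [pvChks]
  | cons c t =>
    rw [pvChks]
    split
    · simp
    · cases h : pvChks c t <;> simp [pvHcons]


theorem pvMapFilter_hcons (c : Char) (chs : List (List Char)) (h : chs ≠ []) :
    (pvHcons c chs).map (fun ch => ch.filter pvKa)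
      = (if pvKa c then pvHcons c (chs.map (fun ch => ch.filter pvKa))
         else chs.map (fun ch => ch.filter pvKa)) := by
  cases chs with
  | nil => exact absurd rfl h
  | cons h1 t1 =>
    by_cases hk : pvKa c = true
    · simp [pvHcons, hk]
    · rw [Bool.not_eq_true] at hk
      simp [pvHcons, hk]


theorem pvL9' (cs : List Char) (c : Char) (hc : c ≠ 'v')
    (H : pvSplitV ((pvInsV c cs).filter pvKa) = (pvChks c cs).map (fun ch => ch.filter pvKa)) :
    pvSplitV ((c :: pvInsV c cs).filter pvKa)
      = (pvHcons c (pvChks c cs)).map (fun ch => ch.filter pvKa) := by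
  rw [pvMapFilter_hcons c _ (pvChks_ne_nil c cs)]
  by_cases hk : pvKa c = true
  · rw [List.filter_cons_of_pos hk, if_pos hk]
    rw [pvSplitV]
    have hcv : (c == 'v') = false := by
      cases he : (c == 'v') with
      | false => rfl
      | true => exact absurd (beq_iff_eq.mp he) hc
    rw [hcv]
    simp only [Bool.false_eq_true, if_false]
    rw [H]
  · rw [Bool.not_eq_true] at hk
    rw [List.filter_cons_of_neg (by simp [hk]), if_neg (by simp [hk])]
    exact H


theorem pvL9 (cs : List Char) : ∀ (p : Char), 'v' ∉ cs →
    pvSplitV ((pvInsV p cs).filter pvKa) = (pvChks p cs).map (fun ch => ch.filter pvKa) := by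
  induction cs with
  | nil => intro p _; simp [pvInsV, pvChks, pvSplitV]
  | cons c t ih =>
    intro p hv
    have hc : c ≠ 'v' := fun h => hv (by rw [h]; exact List.mem_cons_self)
    have hvt : 'v' ∉ t := fun h => hv (List.mem_cons_of_mem _ h)
    have H := ih c hvt
    rw [pvInsV, pvChks]
    by_cases hl : pvIsLimA p c = true
    · rw [if_pos hl, if_pos hl]
      have : (('v' :: c :: pvInsV c t).filter pvKa) = 'v' :: ((c :: pvInsV c t).filter pvKa) := by
        rw [List.filter_cons_of_pos (by decide)]
      rw [show (['v', c] ++ pvInsV c t) = 'v' :: c :: pvInsV c t from rfl, this]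
      rw [pvSplitV]
      simp only [BEq.rfl, if_true]
      rw [pvL9' t c hc H]
      rfl
    · rw [if_neg hl, if_neg hl]
      rw [show ([c] ++ pvInsV c t) = c :: pvInsV c t from rfl]
      exact pvL9' t c hc H


theorem pvVmap_ne_v (c : Char) : pvVmap c ≠ 'v' := by
  unfold pvVmap
  by_cases h : c = 'v'
  · simp [h]
  · simp [h]


-- ---------- B's fold invariant ----------

theorem pvMapCh_cons (cur : List Int) (pending : Bool) (h : List Char) (t : List (List Char)) :
    pvMapCh cur pending (h :: t)
      = pvScan cur pending h :: t.map (fun ch => pvScan [] false ch) := rfl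

theorem pvMapCh_step (c : Char) (cur : List Int) (pending : Bool) (chs : List (List Char))
    (h : chs ≠ []) :
    pvMapCh (pvKstep cur pending c).1 (pvKstep cur pending c).2 chs
      = pvMapCh cur pending (pvHcons c chs) := by
  cases chs with
  | nil => exact absurd rfl h
  | cons h1 t1 => rfl

theorem pvMapCh_nilstate (chs : List (List Char)) :
    pvMapCh [] false chs = chs.map (fun ch => pvScan [] false ch) := by
  cases chs with
  | nil => rfl
  | cons h1 t1 => rfl

theorem pvStepB_eq (done : List (List Int)) (cur : List Int) (pending : Bool) (p : Char)
    (c0 : Char) :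
    pvStepB (done, cur, pending, some p) c0
      = (if pvIsLimA p (pvVmap c0)
         then (done ++ [cur.reverse], (pvKstep [] false (pvVmap c0)).1,
               (pvKstep [] false (pvVmap c0)).2, some (pvVmap c0))
         else (done, (pvKstep cur pending (pvVmap c0)).1,
               (pvKstep cur pending (pvVmap c0)).2, some (pvVmap c0))) := by
  have hBA : pvIsLimB = pvIsLimA := rfl
  unfold pvStepB pvKstep pvVmap
  dsimp only
  rw [hBA]
  by_cases hl : pvIsLimA p (if c0 == 'v' then ' ' else c0) = true
  · rw [if_pos hl, if_pos hl]
    split_ifs <;> rfl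
  · rw [if_neg hl, if_neg hl]
    split_ifs <;> rfl


theorem pvBInv (cs : List Char) :
    ∀ (p : Char) (done : List (List Int)) (cur : List Int) (pending : Bool),
      (cs.foldl pvStepB (done, cur, pending, some p)).1
        ++ [(cs.foldl pvStepB (done, cur, pending, some p)).2.1.reverse]
      = done ++ pvMapCh cur pending (pvChks p (cs.map pvVmap)) := by
  induction cs with
  | nil =>
    intro p done cur pending
    simp [pvChks, pvMapCh, pvScan]
  | cons c0 cs ih =>
    intro p done cur pending
    rw [List.foldl_cons, pvStepB_eq, List.map_cons, pvChks]
    by_cases hl : pvIsLimA p (pvVmap c0) = true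
    · rw [if_pos hl, if_pos hl, ih (pvVmap c0) (done ++ [cur.reverse]) _ _]
      rw [pvMapCh_cons]
      show done ++ [cur.reverse]
            ++ pvMapCh (pvKstep [] false (pvVmap c0)).1 (pvKstep [] false (pvVmap c0)).2
                 (pvChks (pvVmap c0) (cs.map pvVmap))
          = done ++ (cur.reverse
              :: (pvHcons (pvVmap c0) (pvChks (pvVmap c0) (cs.map pvVmap))).map
                   (fun ch => pvScan [] false ch))
      rw [pvMapCh_step _ _ _ _ (pvChks_ne_nil _ _), pvMapCh_nilstate]
      simp
    · rw [if_neg hl, if_neg hl, ih (pvVmap c0) done _ _]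
      rw [pvMapCh_step _ _ _ _ (pvChks_ne_nil _ _)]


theorem pvStepB_none (done : List (List Int)) (cur : List Int) (pending : Bool) (c0 : Char) :
    pvStepB (done, cur, pending, none) c0
      = (done, (pvKstep cur pending (pvVmap c0)).1,
         (pvKstep cur pending (pvVmap c0)).2, some (pvVmap c0)) := by
  unfold pvStepB pvKstep pvVmap
  dsimp only
  split_ifs <;> rfl

theorem pvB_eq (s : String) :
    parse_cnf_alt s = (pvChA (s.toList.map pvVmap)).map (fun ch => pvScan [] false ch) := by
  unfold parse_cnf_alt
  dsimp only
  cases hs : s.toList with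
  | nil => simp [pvChA, pvScan]
  | cons c0 cs =>
    rw [List.foldl_cons, pvStepB_none, pvBInv cs (pvVmap c0) [] _ _]
    rw [List.map_cons, pvChA]
    rw [pvMapCh_step _ _ _ _ (pvChks_ne_nil _ _), pvMapCh_nilstate]
    simp


-- ---------- assembly ----------

theorem pvSplitIns (l0 : List Char) (hv : 'v' ∉ l0) :
    pvSplitV ((pvInsA l0).filter pvKa) = (pvChA l0).map (fun ch => ch.filter pvKa) := by
  cases l0 with
  | nil => simp [pvInsA, pvSplitV, pvChA]
  | cons c cs =>
    have hc : c ≠ 'v' := fun h => hv (by rw [h]; exact List.mem_cons_self)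
    have hvt : 'v' ∉ cs := fun h => hv (List.mem_cons_of_mem _ h)
    rw [pvInsA, pvChA]
    exact pvL9' cs c hc (pvL9 cs c hvt)

theorem pvA_eq (s : String) :
    parse_cnf s = (pvChA (s.toList.map pvVmap)).map (fun ch => pvSegLits (ch.filter pvKa)) := by
  unfold parse_cnf
  dsimp only
  rw [pvReplace_single 'v' ' ']
  rw [show (fun c => if c == 'v' then ' ' else c) = pvVmap from rfl]
  rw [pvInsLoop]
  rw [pvReplace_del '(', pvReplace_del ')', pvReplace_del ' ']
  rw [pvParseDnf_eq]
  rw [List.filter_filter, List.filter_filter, List.filter_filter]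
  have hv : 'v' ∉ s.toList.map pvVmap := by
    intro h
    obtain ⟨c, _, hc⟩ := List.mem_map.mp h
    exact pvVmap_ne_v c hc
  rw [List.filter_congr (fun c _ => pvKa_pointwise c), pvSplitIns _ hv, List.map_map]
  rfl


theorem pvChunk_eq (ch : List Char) : pvScan [] false ch = pvSegLits (ch.filter pvKa) := by
  rw [pvScan_filter]
  have h : ∀ c ∈ ch.filter pvKa, pvRem c = false := by
    intro c hc
    have hk := (List.mem_filter.mp hc).2
    unfold pvKa at hk
    simpa using hk
  have := (pvScanSeg _ h).1 []
  simpa using this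



-- ===== VERDICT (by name: the statement is the Claim_ definition above) =====
theorem parse_cnf_spec : Claim_equal_parse_cnf := by
  intro cnf_str _
  unfold Spec_parse_cnf
  rw [pvA_eq, pvB_eq]
  exact List.map_congr_left (fun ch _ => (pvChunk_eq ch).symm)
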